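-- pv_equiv track=rewrite | github.com/WayHoo/MedicalOCR | ppocr/infer/predict_cls.py | check_img_rotate
-- ===== SOURCE A (Python) =====
-- def check_img_rotate(det_rotate_list, cls_rotate_list):
--     """
--     check if the image need rotate and go back to run text detector again
--     :param det_rotate_list: True - rotate 90° counterclockwise when aspect ratio is greater than 1.5
--     :param cls_rotate_list: True - rotate 180° in cls_det
--     :return: the angle that needs to be rotated, [0°, 90°, 180°, 270°]
--     """
--     degree = [0, 90, 180, 270]
--     rotate_list = [0]*4
--     for i, det_ro in enumerate(det_rotate_list):
--         cls_ro = cls_rotate_list[i]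
--         if not det_ro and not cls_ro:
--             rotate_list[0] += 1  # no need to rotate
--         elif not det_ro and cls_ro:
--             rotate_list[2] += 1  # rotate 180°
--         elif det_ro and not cls_ro:
--             rotate_list[3] += 1  # rotate 90° counterclockwise
--         else:
--             rotate_list[1] += 1  # # rotate 270° counterclockwise
--     max_idx = rotate_list.index(max(rotate_list))
--     return degree[max_idx]
-- ===== SOURCE B (Python) =====
-- def check_img_rotate(det_rotate_list, cls_rotate_list):
--     # Materialize each pair's angle, sort the angles, then pick the longest run
--     # (ties go to the smallest angle, which matches A's first-max-index rule).
--     angles = [(0, 180, 270, 90)[2 * bool(det_ro) + bool(cls_rotate_list[i])]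
--               for i, det_ro in enumerate(det_rotate_list)]
--     angles.sort()
--     best_angle, best_run = 0, 0
--     cur_angle, cur_run = None, 0
--     for a in angles:
--         if a == cur_angle:
--             cur_run += 1
--         else:
--             cur_angle, cur_run = a, 1
--         if cur_run > best_run:
--             best_angle, best_run = a, cur_run
--     return best_angle
-- ===== Notes on version B (the rewrite author's own statement) =====
-- stated objective: alternative
-- what changed: A's single counting pass (4-way if/elif into a fixed 4-slot list, then max/index/degree-table lookup) is replaced by a staged sort-and-scan algorithm: materialize each pair's angle via a small lookup table, sort the angle list, and scan it for the longest run, ties going to the first (smallest) angle, which coincides with A's first-max-index rule.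
import Mathlib
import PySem

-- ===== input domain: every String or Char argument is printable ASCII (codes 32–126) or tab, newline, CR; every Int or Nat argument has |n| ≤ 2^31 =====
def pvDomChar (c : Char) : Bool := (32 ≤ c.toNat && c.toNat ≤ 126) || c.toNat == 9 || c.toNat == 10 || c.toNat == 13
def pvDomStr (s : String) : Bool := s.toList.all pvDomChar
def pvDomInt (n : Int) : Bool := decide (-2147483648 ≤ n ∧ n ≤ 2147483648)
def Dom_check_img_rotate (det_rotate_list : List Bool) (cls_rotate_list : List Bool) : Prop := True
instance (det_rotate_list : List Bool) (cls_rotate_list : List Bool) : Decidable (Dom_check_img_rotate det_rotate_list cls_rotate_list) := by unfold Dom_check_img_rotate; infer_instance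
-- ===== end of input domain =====

-- B replaces A's branch-cascade counting into a fixed 4-slot list + max/index/degree lookup by a
-- different algorithm: materialize the per-pair angles, sort them, and scan for the longest run
-- (first/smallest angle wins ties, which coincides with A's first-max-index rule); objective: alternative.

-- ===== PORT A =====
-- rotate_list[i] += 1
def pvBump (r : List Int) (i : Nat) : List Int := r.set i (r.getD i 0 + 1)

-- the 'for i, det_ro in enumerate(det_rotate_list)' loop of A; none = IndexError on cls_rotate_list[i]
def pvALoop (cls : List Bool) : List (Int × Bool) → List Int → Option (List Int)
  | [], r => some r
  | (i, det_ro) :: rest, r =>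
    match PySem.List.pyGet? cls i with
    | none => none
    | some cls_ro =>
      if !det_ro && !cls_ro then pvALoop cls rest (pvBump r 0)
      else if !det_ro && cls_ro then pvALoop cls rest (pvBump r 2)
      else if det_ro && !cls_ro then pvALoop cls rest (pvBump r 3)
      else pvALoop cls rest (pvBump r 1)

def check_img_rotate (det_rotate_list : List Bool) (cls_rotate_list : List Bool) : Int :=
  let degree : List Int := [0, 90, 180, 270]
  match pvALoop cls_rotate_list (PySem.List.enumerate det_rotate_list) [0, 0, 0, 0] with
  | none => 0  -- IndexError in Python; excluded by Pre_
  | some rotate_list =>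
    match PySem.List.max? rotate_list (fun x => x) with
    | none => 0  -- unreachable: rotate_list has 4 elements
    | some m =>
      match PySem.List.index? rotate_list m with
      | none => 0  -- unreachable: m ∈ rotate_list
      | some max_idx => (PySem.List.pyGet? degree (max_idx : Int)).getD 0

-- ===== PORT B =====
-- the angle comprehension of B; none = IndexError on cls_rotate_list[i]
def pvAngles (cls : List Bool) : List (Int × Bool) → Option (List Int)
  | [] => some []
  | (i, det_ro) :: rest =>
    match PySem.List.pyGet? cls i with
    | none => none
    | some cls_ro =>
      match pvAngles cls rest with
      | none => none
      | some tl =>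
        some ((([0, 180, 270, 90] : List Int).getD
                ((if det_ro then 2 else 0) + (if cls_ro then 1 else 0)) 0) :: tl)

-- the run-scanning loop of B; state = (best_angle, best_run, cur_angle, cur_run)
def pvScan : List Int → Int × Int × Option Int × Int → Int × Int × Option Int × Int
  | [], st => st
  | a :: rest, (ba, br, ca, cr) =>
    let s1 : Option Int × Int := if ca = some a then (ca, cr + 1) else (some a, 1)
    let s2 : Int × Int := if s1.2 > br then (a, s1.2) else (ba, br)
    pvScan rest (s2.1, s2.2, s1.1, s1.2)

def check_img_rotate_alt (det_rotate_list : List Bool) (cls_rotate_list : List Bool) : Int :=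
  match pvAngles cls_rotate_list (PySem.List.enumerate det_rotate_list) with
  | none => 0  -- IndexError in Python; excluded by Pre_
  | some angles =>
    (pvScan (PySem.List.sorted angles (fun x => x) false) (0, 0, none, 0)).1

-- ===== PRECONDITION & SPEC =====
-- Pre_ excludes exactly the inputs where cls_rotate_list is shorter than det_rotate_list,
-- on which both A and B raise IndexError at cls_rotate_list[i].
def Pre_check_img_rotate (det_rotate_list : List Bool) (cls_rotate_list : List Bool) : Prop :=
  det_rotate_list.length ≤ cls_rotate_list.length
instance (det_rotate_list : List Bool) (cls_rotate_list : List Bool) : Decidable (Pre_check_img_rotate det_rotate_list cls_rotate_list) := by unfold Pre_check_img_rotate; infer_instance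
def pvWitness_check_img_rotate : List Bool × List Bool := ([true, false], [false, true])

def Spec_check_img_rotate (det_rotate_list : List Bool) (cls_rotate_list : List Bool) (out : Int) : Prop := out = check_img_rotate_alt det_rotate_list cls_rotate_list
instance (det_rotate_list : List Bool) (cls_rotate_list : List Bool) (out : Int) : Decidable (Spec_check_img_rotate det_rotate_list cls_rotate_list out) := by unfold Spec_check_img_rotate; infer_instance

-- ===== CLAIM (what is proved, stated in full; the proofs are below) =====
def Claim_equal_check_img_rotate : Prop := ∀ (det_rotate_list : List Bool) (cls_rotate_list : List Bool), Dom_check_img_rotate det_rotate_list cls_rotate_list → Pre_check_img_rotate det_rotate_list cls_rotate_list → Spec_check_img_rotate det_rotate_list cls_rotate_list (check_img_rotate det_rotate_list cls_rotate_list)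

-- ===== LEMMAS AND PROOFS =====

-- A's loop and B's comprehension fail together, and A's four slots are exactly the
-- multiplicities of the four angles in B's list (whose members all lie in {0,90,180,270}).
theorem pv_loop_corr (cls : List Bool) :
    ∀ (es : List (Int × Bool)) (a b c d : Int),
      (pvAngles cls es = none ∧ pvALoop cls es [a, b, c, d] = none) ∨
      (∃ L, pvAngles cls es = some L ∧
        pvALoop cls es [a, b, c, d] =
          some [a + L.count 0, b + L.count 90, c + L.count 180, d + L.count 270] ∧
        ∀ x ∈ L, x = 0 ∨ x = 90 ∨ x = 180 ∨ x = 270) := by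
  intro es
  induction es with
  | nil =>
    intro a b c d
    exact Or.inr ⟨[], rfl, by simp [pvALoop], by simp⟩
  | cons p rest ih =>
    intro a b c d
    obtain ⟨i, det_ro⟩ := p
    cases hg : PySem.List.pyGet? cls i with
    | none => exact Or.inl ⟨by simp [pvAngles, hg], by simp [pvALoop, hg]⟩
    | some cls_ro =>
      cases det_ro <;> cases cls_ro
      · -- angle 0, slot 0
        rcases ih (a + 1) b c d with ⟨hB, hA⟩ | ⟨L, hB, hA, hmem⟩
        · exact Or.inl ⟨by simp [pvAngles, hg, hB], by simp [pvALoop, hg, pvBump, hA]⟩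
        · refine Or.inr ⟨0 :: L, by simp [pvAngles, hg, hB], ?_, ?_⟩
          · simp only [pvALoop, hg, pvBump]
            simp only [List.set, List.getD, List.getElem?_cons_zero, Option.getD_some]
            rw [hA]
            congr 2 <;> simp [List.count_cons] <;> push_cast <;> ring
          · intro x hx; rcases List.mem_cons.mp hx with h | h
            · exact Or.inl h
            · exact hmem x h
      · -- angle 180, slot 2
        rcases ih a b (c + 1) d with ⟨hB, hA⟩ | ⟨L, hB, hA, hmem⟩
        · exact Or.inl ⟨by simp [pvAngles, hg, hB], by simp [pvALoop, hg, pvBump, hA]⟩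
        · refine Or.inr ⟨180 :: L, by simp [pvAngles, hg, hB], ?_, ?_⟩
          · simp only [pvALoop, hg, pvBump]
            simp only [List.set, List.getD, List.getElem?_cons_zero, List.getElem?_cons_succ, Option.getD_some]
            rw [hA]
            congr 2 <;> simp [List.count_cons] <;> push_cast <;> ring
          · intro x hx; rcases List.mem_cons.mp hx with h | h
            · exact Or.inr (Or.inr (Or.inl h))
            · exact hmem x h
      · -- angle 270, slot 3
        rcases ih a b c (d + 1) with ⟨hB, hA⟩ | ⟨L, hB, hA, hmem⟩
        · exact Or.inl ⟨by simp [pvAngles, hg, hB], by simp [pvALoop, hg, pvBump, hA]⟩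
        · refine Or.inr ⟨270 :: L, by simp [pvAngles, hg, hB], ?_, ?_⟩
          · simp only [pvALoop, hg, pvBump]
            simp only [List.set, List.getD, List.getElem?_cons_zero, List.getElem?_cons_succ, Option.getD_some]
            rw [hA]
            congr 2 <;> simp [List.count_cons] <;> push_cast <;> ring
          · intro x hx; rcases List.mem_cons.mp hx with h | h
            · exact Or.inr (Or.inr (Or.inr h))
            · exact hmem x h
      · -- angle 90, slot 1
        rcases ih a (b + 1) c d with ⟨hB, hA⟩ | ⟨L, hB, hA, hmem⟩
        · exact Or.inl ⟨by simp [pvAngles, hg, hB], by simp [pvALoop, hg, pvBump, hA]⟩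
        · refine Or.inr ⟨90 :: L, by simp [pvAngles, hg, hB], ?_, ?_⟩
          · simp only [pvALoop, hg, pvBump]
            simp only [List.set, List.getD, List.getElem?_cons_zero, List.getElem?_cons_succ, Option.getD_some]
            rw [hA]
            congr 2 <;> simp [List.count_cons] <;> push_cast <;> ring
          · intro x hx; rcases List.mem_cons.mp hx with h | h
            · exact Or.inr (Or.inl h)
            · exact hmem x h

-- sorting a list over {0,90,180,270} yields the four replicate blocks in order
theorem pv_sorted_canonical (L : List Int)
    (hmem : ∀ x ∈ L, x = 0 ∨ x = 90 ∨ x = 180 ∨ x = 270) :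
    PySem.List.sorted L (fun x => x) false =
      List.replicate (L.count 0) 0 ++ List.replicate (L.count 90) 90 ++
      List.replicate (L.count 180) 180 ++ List.replicate (L.count 270) 270 := by
  apply PySem.List.sorted_id_eq_of_perm_of_pairwise
  · rw [List.perm_iff_count]
    intro x
    by_cases h0 : x = 0
    · subst h0; simp [List.count_append, List.count_replicate]
    by_cases h90 : x = 90
    · subst h90; simp [List.count_append, List.count_replicate]
    by_cases h180 : x = 180
    · subst h180; simp [List.count_append, List.count_replicate]
    by_cases h270 : x = 270
    · subst h270; simp [List.count_append, List.count_replicate]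
    have hx : x ∉ L := fun h => by rcases hmem x h with h | h | h | h <;> simp_all
    simp only [List.count_append, List.count_replicate, List.count_eq_zero.mpr hx, beq_iff_eq]
    split_ifs <;> omega
  · simp only [List.pairwise_append, List.pairwise_replicate, List.mem_replicate]
    refine ⟨⟨⟨?_, ?_, ?_⟩, ?_, ?_⟩, ?_, ?_⟩
    all_goals first | (right; omega) | (intros; omega) | (intros; simp_all; omega)

theorem pvScan_append (l1 l2 : List Int) (st : Int × Int × Option Int × Int) :
    pvScan (l1 ++ l2) st = pvScan l2 (pvScan l1 st) := by
  induction l1 generalizing st with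
  | nil => rfl
  | cons a t ih => obtain ⟨ba, br, ca, cr⟩ := st; simp [pvScan, ih]

-- scanning a replicate block while already inside a run of x
theorem pv_scan_inblock (x : Int) :
    ∀ (n : Nat) (ba br cr : Int), cr ≤ br →
      pvScan (List.replicate n x) (ba, br, some x, cr) =
        ((if br < cr + n then x else ba), max br (cr + n), some x, cr + n) := by
  intro n
  induction n with
  | zero =>
    intro ba br cr h
    simp only [List.replicate_zero, pvScan, Nat.cast_zero, add_zero, Prod.mk.injEq]
    and_intros <;> first | rfl | trivial | (split_ifs <;> omega) | omega
  | succ m ih =>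
    intro ba br cr h
    rw [List.replicate_succ]
    by_cases hb : cr + 1 > br
    · simp only [pvScan, if_true, if_pos hb]
      rw [ih x (cr + 1) (cr + 1) le_rfl]
      simp only [Prod.mk.injEq]
      and_intros <;> first | rfl | trivial | (split_ifs <;> omega) | omega
    · simp only [pvScan, if_true, if_neg hb]
      rw [ih ba br (cr + 1) (by omega)]
      simp only [Prod.mk.injEq]
      and_intros <;> first | rfl | trivial | (split_ifs <;> omega) | omega

theorem pv_scan_block (x ba br : Int) (ca : Option Int) (cr : Int)
    (hbr : 0 ≤ br) (hca : ca ≠ some x) (n : Nat) :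
    pvScan (List.replicate n x) (ba, br, ca, cr) =
      ((if 0 < n ∧ br < (n : Int) then x else ba), max br (n : Int),
       (if 0 < n then some x else ca), (if 0 < n then (n : Int) else cr)) := by
  cases n with
  | zero =>
    simp only [List.replicate_zero, pvScan, Nat.cast_zero]
    and_intros <;> first | rfl | trivial | (split_ifs <;> omega) | omega | (simp; omega) | simp
  | succ m =>
    rw [List.replicate_succ]
    have hne : ¬ (ca = some x) := hca
    by_cases hb : (1:Int) > br
    · simp only [pvScan, if_neg hne, if_pos hb]
      rw [pv_scan_inblock x m x 1 1 le_rfl]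
      simp only [Prod.mk.injEq]
      and_intros <;> first | rfl | trivial | (split_ifs <;> omega) | omega | (simp; omega) | simp
    · simp only [pvScan, if_neg hne, if_neg hb]
      rw [pv_scan_inblock x m ba br 1 (by omega)]
      simp only [Prod.mk.injEq]
      and_intros <;> first | rfl | trivial | (split_ifs <;> omega) | omega | (simp; omega) | simp

theorem pv_scan_canonical (n0 n90 n180 n270 : Nat) :
    (pvScan (List.replicate n0 0 ++ List.replicate n90 90 ++
             List.replicate n180 180 ++ List.replicate n270 270)
      (0, 0, none, 0)).1 =
    (if 0 < n270 ∧ max (max (max (0:Int) n0) n90) n180 < (n270 : Int) then 270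
     else if 0 < n180 ∧ max (max (0:Int) n0) n90 < (n180 : Int) then 180
     else if 0 < n90 ∧ max (0:Int) n0 < (n90 : Int) then 90
     else 0) := by
  rw [pvScan_append, pvScan_append, pvScan_append,
      pv_scan_block 0 0 0 none 0 le_rfl (by simp) n0,
      pv_scan_block 90 (if 0 < n0 ∧ (0:Int) < (n0:Int) then 0 else 0) (max 0 (n0:Int))
        (if 0 < n0 then some 0 else none) (if 0 < n0 then (n0:Int) else 0)
        (le_max_left 0 (n0:Int)) (by split_ifs <;> simp) n90,
      pv_scan_block 180
        (if 0 < n90 ∧ max 0 (n0:Int) < (n90:Int) then 90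
         else if 0 < n0 ∧ (0:Int) < (n0:Int) then 0 else 0)
        (max (max 0 (n0:Int)) (n90:Int))
        (if 0 < n90 then some 90 else if 0 < n0 then some 0 else none)
        (if 0 < n90 then (n90:Int) else if 0 < n0 then (n0:Int) else 0)
        (le_trans (le_max_left 0 (n0:Int)) (le_max_left _ _)) (by split_ifs <;> simp) n180,
      pv_scan_block 270
        (if 0 < n180 ∧ max (max 0 (n0:Int)) (n90:Int) < (n180:Int) then 180
         else if 0 < n90 ∧ max 0 (n0:Int) < (n90:Int) then 90
         else if 0 < n0 ∧ (0:Int) < (n0:Int) then 0 else 0)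
        (max (max (max 0 (n0:Int)) (n90:Int)) (n180:Int))
        (if 0 < n180 then some 180 else if 0 < n90 then some 90 else if 0 < n0 then some 0 else none)
        (if 0 < n180 then (n180:Int) else if 0 < n90 then (n90:Int) else if 0 < n0 then (n0:Int) else 0)
        (by positivity) (by split_ifs <;> simp) n270]
  split_ifs <;> omega

theorem pv_sel_eq (n0 n90 n180 n270 : Nat) :
    (match PySem.List.max? [((n0 : Nat) : Int), n90, n180, n270] (fun x => x) with
      | none => (0 : Int)
      | some m =>
        match PySem.List.index? [((n0 : Nat) : Int), n90, n180, n270] m with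
        | none => 0
        | some max_idx => (PySem.List.pyGet? ([0, 90, 180, 270] : List Int) (max_idx : Int)).getD 0) =
    (if 0 < n270 ∧ max (max (max (0:Int) n0) n90) n180 < (n270 : Int) then 270
     else if 0 < n180 ∧ max (max (0:Int) n0) n90 < (n180 : Int) then 180
     else if 0 < n90 ∧ max (0:Int) n0 < (n90 : Int) then 90
     else 0) := by
  simp only [PySem.List.max?, PySem.List.index?, List.foldl_cons, List.foldl_nil]
  by_cases h1 : ((n0:Int)) < n90 <;>
    simp only [h1, if_true, if_false] <;>
  [ (by_cases h2 : ((n90:Int)) < n180); (by_cases h2 : ((n0:Int)) < n180) ] <;>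
    simp only [h2, if_true, if_false] <;>
  [ (by_cases h3 : ((n180:Int)) < n270); (by_cases h3 : ((n90:Int)) < n270);
    (by_cases h3 : ((n180:Int)) < n270); (by_cases h3 : ((n0:Int)) < n270) ] <;>
    simp only [h3, if_true, if_false] <;>
    simp only [List.idxOf?, List.findIdx?, List.findIdx?.go, beq_iff_eq] <;>
    (split_ifs <;> norm_num [PySem.List.pyGet?, PySem.List.pyIdx?] <;> first | decide | omega)

theorem check_img_rotate_spec : Claim_equal_check_img_rotate := by
  intro det cls _ hpre
  unfold Spec_check_img_rotate check_img_rotate check_img_rotate_alt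
  rcases pv_loop_corr cls (PySem.List.enumerate det) 0 0 0 0 with ⟨hB, hA⟩ | ⟨L, hB, hA, hmem⟩
  · simp [hA, hB]
  · simp only [hA, hB, zero_add]
    rw [pv_sorted_canonical L hmem, pv_scan_canonical]
    exact pv_sel_eq (L.count 0) (L.count 90) (L.count 180) (L.count 270)
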